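-- pv_equiv track=rewrite | github.com/raresradua/PythonProgrammingLabs | Lab2/main.py | ex_12
-- ===== SOURCE A (Python) =====
-- def ex_12(list_of_words):
--     """
--         Write a function that will receive a list of words  as parameter and will return a list of lists of words,
--         grouped by rhyme. Two words rhyme if both of them end with the same 2 letters.
--
-- 	    Example: group_by_rhyme(['ana', 'banana', 'carte', 'arme', 'parte']) will
--                  return [['ana', 'banana'], ['carte', 'parte'], ['arme']]
--
--         :return: list of lists with words that rhyme with each other
--     """
--
--     rhyme = dict()
--     for word in list_of_words:
--         if word[-2:] not in rhyme:
--             rhyme[word[-2:]] = [word]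
--         else:
--             rhyme[word[-2:]].append(word)
--
--     return list(rhyme.values())
-- ===== SOURCE B (Python) =====
-- def ex_12(list_of_words):
--     # Two-phase: first collect distinct rhyme keys in first-appearance order,
--     # then build each group by a separate full scan filtered on the key.
--     keys = []
--     for w in list_of_words:
--         k = w[-2:]
--         if k not in keys:
--             keys.append(k)
--     return [[w for w in list_of_words if w[-2:] == k] for k in keys]
-- ===== Notes on version B (the rewrite author's own statement) =====
-- stated objective: alternative
-- what changed: Replaces the single-pass dict-of-lists accumulation with a two-phase nested-scan algorithm: first a pass collecting the distinct last-two-letter keys in first-appearance order, then one full filtering scan of the input per key to build each group.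
import Mathlib
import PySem

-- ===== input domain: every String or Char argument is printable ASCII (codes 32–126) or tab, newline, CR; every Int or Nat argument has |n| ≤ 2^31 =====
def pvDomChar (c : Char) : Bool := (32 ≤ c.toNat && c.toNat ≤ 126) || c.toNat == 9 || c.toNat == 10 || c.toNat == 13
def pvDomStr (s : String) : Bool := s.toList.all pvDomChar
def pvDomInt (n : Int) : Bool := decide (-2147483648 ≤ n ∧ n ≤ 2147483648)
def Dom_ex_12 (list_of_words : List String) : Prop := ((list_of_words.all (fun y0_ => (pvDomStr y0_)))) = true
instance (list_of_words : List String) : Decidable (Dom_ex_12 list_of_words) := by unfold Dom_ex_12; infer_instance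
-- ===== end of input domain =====

-- B groups by a two-phase nested-scan algorithm (distinct keys, then one filtering scan per key)
-- instead of A's single-pass dict-of-lists accumulation; alternative decomposition, not faster.

-- word[-2:] (exact Python slice semantics, shared by both ports)
def pvKey (word : String) : String := PySem.Str.slice word (some (-2)) none

-- ===== PORT A =====
def ex_12 (list_of_words : List String) : List (List String) :=
  (list_of_words.foldl
    (fun rhyme word =>
      if !rhyme.contains (pvKey word) then
        rhyme.insert (pvKey word) [word]
      else
        rhyme.modify (pvKey word) [] (fun l => l ++ [word]))
    PySem.Dict.empty).values

-- ===== PORT B =====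
def ex_12_alt (list_of_words : List String) : List (List String) :=
  let keys := list_of_words.foldl
    (fun ks w => if pvKey w ∈ ks then ks else ks ++ [pvKey w]) ([] : List String)
  keys.map (fun k => list_of_words.filter (fun w => pvKey w == k))

-- ===== PRECONDITION & SPEC =====
def Spec_ex_12 (list_of_words : List String) (out : List (List String)) : Prop := out = ex_12_alt list_of_words
instance (list_of_words : List String) (out : List (List String)) : Decidable (Spec_ex_12 list_of_words out) := by unfold Spec_ex_12; infer_instance

-- ===== CLAIM (what is proved, stated in full; the proofs are below) =====
def Claim_equal_ex_12 : Prop := ∀ (list_of_words : List String), Dom_ex_12 list_of_words → Spec_ex_12 list_of_words (ex_12 list_of_words)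

-- ===== LEMMAS AND PROOFS =====

-- A's loop body, named for the lemmas below
def pvStepA (rhyme : PySem.Dict String (List String)) (word : String) : PySem.Dict String (List String) :=
  if !rhyme.contains (pvKey word) then
    rhyme.insert (pvKey word) [word]
  else
    rhyme.modify (pvKey word) [] (fun l => l ++ [word])

lemma pvStepA_keys (d : PySem.Dict String (List String)) (w : String) :
    (pvStepA d w).keys = if pvKey w ∈ d.keys then d.keys else d.keys ++ [pvKey w] := by
  unfold pvStepA
  by_cases h : d.contains (pvKey w)
  · simp [h, (PySem.Dict.contains_iff_mem_keys d (pvKey w)).mp h,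
      PySem.Dict.keys_modify, PySem.Dict.keys_insert_of_contains]
  · have h' : pvKey w ∉ d.keys := fun hm => h ((PySem.Dict.contains_iff_mem_keys d (pvKey w)).mpr hm)
    simp [eq_false_of_ne_true h, h', PySem.Dict.keys_insert_of_not_contains]

lemma pvStepA_nodup (d : PySem.Dict String (List String)) (w : String) (h : d.keys.Nodup) :
    (pvStepA d w).keys.Nodup := by
  rw [pvStepA_keys]
  split_ifs with hm
  · exact h
  · simpa using List.Nodup.append h (List.nodup_singleton _) (by simpa using hm)

lemma pvStepA_getD (d : PySem.Dict String (List String)) (w : String) (k : String) :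
    (pvStepA d w).getD k [] =
      if k = pvKey w then d.getD (pvKey w) [] ++ [w] else d.getD k [] := by
  unfold pvStepA
  by_cases h : d.contains (pvKey w)
  · simp [h, PySem.Dict.getD_modify]
  · have h0 : d.getD (pvKey w) [] = [] :=
      PySem.Dict.getD_of_not_contains d [] (eq_false_of_ne_true h)
    simp [eq_false_of_ne_true h, PySem.Dict.getD_insert, h0]

lemma pvFoldA_keys (ws : List String) (d : PySem.Dict String (List String)) :
    (ws.foldl pvStepA d).keys =
      ws.foldl (fun ks w => if pvKey w ∈ ks then ks else ks ++ [pvKey w]) d.keys := by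
  induction ws generalizing d with
  | nil => rfl
  | cons w ws ih => simp only [List.foldl_cons, ih, pvStepA_keys]

lemma pvFoldA_nodup (ws : List String) (d : PySem.Dict String (List String)) (h : d.keys.Nodup) :
    (ws.foldl pvStepA d).keys.Nodup := by
  induction ws generalizing d with
  | nil => exact h
  | cons w ws ih => exact ih _ (pvStepA_nodup d w h)

lemma pvFoldA_getD (ws : List String) (d : PySem.Dict String (List String)) (k : String) :
    (ws.foldl pvStepA d).getD k [] = d.getD k [] ++ ws.filter (fun w => pvKey w == k) := by
  induction ws generalizing d with
  | nil => simp
  | cons w ws ih =>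
    simp only [List.foldl_cons, ih, pvStepA_getD, List.filter_cons]
    by_cases hk : pvKey w = k
    · simp [hk]
    · have hk' : ¬ k = pvKey w := fun h => hk h.symm
      simp [hk, hk']

-- ===== VERDICT (by name: the statement is the Claim_ definition above) =====
theorem ex_12_spec : Claim_equal_ex_12 := by
  intro ws _
  show ex_12 ws = ex_12_alt ws
  unfold ex_12 ex_12_alt
  have hfold : ∀ (d : PySem.Dict String (List String)),
      ws.foldl (fun rhyme word =>
        if !rhyme.contains (pvKey word) then rhyme.insert (pvKey word) [word]
        else rhyme.modify (pvKey word) [] (fun l => l ++ [word])) d = ws.foldl pvStepA d := by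
    intro d; rfl
  rw [hfold]
  have hnd := pvFoldA_nodup ws PySem.Dict.empty (by simp)
  rw [PySem.Dict.values_eq_map_keys _ hnd ([] : List String)]
  rw [pvFoldA_keys]
  simp only [PySem.Dict.keys_empty]
  apply List.map_congr_left
  intro k _
  rw [pvFoldA_getD]
  simp
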